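-- pv_equiv track=rewrite | github.com/hothothotdog/CP2-CopyIIPC-Snatchit-Tools-and-Documentation | cp2_recover.py | _logical_spt
-- ===== SOURCE A (Python) =====
-- def _logical_spt(smap: dict) -> int:
--     """
--     Return the logical sectors-per-track for one track's sector map.
--
--     Standard floppies number sectors 1..N consecutively.  Copy-protected
--     disks often interleave non-standard sector numbers (e.g. 10, 12, 14…27)
--     among the real data sectors.  Using max(smap.keys()) on such a track
--     would return 27 instead of 8, exploding the inferred geometry.
--
--     This function returns the length of the unbroken consecutive run
--     1, 2, 3, … starting from sector 1 (only counting sector numbers in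
--     the standard floppy range [1..18]).  If no such run exists it falls
--     back to max(smap.keys()) — the legacy behaviour for unusual disks.
--     """
--     secs = sorted(s for s in smap.keys() if 1 <= s <= 18)
--     run = 0
--     for s in secs:
--         if s == run + 1:
--             run = s
--         else:
--             break
--     return run if run > 0 else (max(smap.keys()) if smap else 0)
-- ===== SOURCE B (Python) =====
-- def _logical_spt(smap: dict) -> int:
--     # One pass: set a bit per in-range sector number while tracking the overall max key,
--     # then count the consecutive bits 1, 2, 3, ... of the mask.
--     mask = 0
--     mx = None
--     for s in smap:
--         if 1 <= s <= 18:
--             mask |= 1 << s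
--         if mx is None or s > mx:
--             mx = s
--     run = 0
--     m = mask >> 1
--     while m & 1:
--         run += 1
--         m >>= 1
--     return run if run > 0 else (mx if mx is not None else 0)
-- ===== Notes on version B (the rewrite author's own statement) =====
-- stated objective: alternative
-- what changed: Replaced 'dedup the keys, sort the in-range ones and scan the sorted list breaking at the first gap' by a single pass that sets one bit per in-range sector in an integer bitmask (tracking the max key in the same pass) and then counts the consecutive low bits of the mask starting at bit 1; no dedup, no sort, no sorted scan.
import Mathlib
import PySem

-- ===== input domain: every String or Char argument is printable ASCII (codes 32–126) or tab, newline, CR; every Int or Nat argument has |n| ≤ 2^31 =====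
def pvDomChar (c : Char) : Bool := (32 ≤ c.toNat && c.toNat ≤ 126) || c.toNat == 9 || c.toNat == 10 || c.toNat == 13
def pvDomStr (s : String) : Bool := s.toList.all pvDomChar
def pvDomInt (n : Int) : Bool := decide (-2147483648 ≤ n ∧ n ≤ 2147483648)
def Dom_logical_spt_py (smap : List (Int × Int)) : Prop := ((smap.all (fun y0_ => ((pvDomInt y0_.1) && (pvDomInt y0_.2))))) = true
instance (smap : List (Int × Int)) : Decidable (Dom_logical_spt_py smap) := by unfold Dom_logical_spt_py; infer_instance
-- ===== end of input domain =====

-- B replaces A's dedup+sort+scan-for-gap by a one-pass bitmask (plus running max) and a count of the mask's consecutive low bits (alternative algorithm).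


-- ===== PORT A =====
-- the 'for s in secs: if s == run+1: run = s else: break' loop
def pvARun : List Int → Int → Int
  | [], run => run
  | s :: t, run => if s = run + 1 then pvARun t s else run

def logical_spt_py (smap : List (Int × Int)) : Int :=
  -- smap.keys(): a dict's keys are its key list deduplicated (first occurrences)
  let keys := PySem.List.dedup (smap.map (fun p => p.1))
  let secs := PySem.List.sorted (keys.filter (fun s => decide (1 ≤ s) && decide (s ≤ 18))) (fun x => x) false
  let run := pvARun secs 0
  if run > 0 then run
  else match PySem.List.max? keys (fun x => x) with
       | some m => m
       | none => 0

-- ===== PORT B =====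
-- the single 'for s in smap:' pass: bitmask of in-range sectors and running max key
def pvBFold : List (Int × Int) → Nat → Option Int → Nat × Option Int
  | [], mask, mx => (mask, mx)
  | p :: t, mask, mx =>
      let mask' := if 1 ≤ p.1 ∧ p.1 ≤ 18 then mask ||| (1 <<< p.1.toNat) else mask
      let mx' := match mx with
        | none => some p.1
        | some m => if m < p.1 then some p.1 else some m
      pvBFold t mask' mx'

-- the 'while m & 1: run += 1; m >>= 1' loop (structural: m strictly decreases)
def pvTrailOnes (m : Nat) : Nat :=
  if h : m % 2 = 1 then pvTrailOnes (m / 2) + 1 else 0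
termination_by m
decreasing_by omega

def logical_spt_py_alt (smap : List (Int × Int)) : Int :=
  let r := pvBFold smap 0 none
  let run : Nat := pvTrailOnes (r.1 >>> 1)
  if (run : Int) > 0 then (run : Int) else r.2.getD 0

-- ===== PRECONDITION & SPEC =====
def Spec_logical_spt_py (smap : List (Int × Int)) (out : Int) : Prop := out = logical_spt_py_alt smap
instance (smap : List (Int × Int)) (out : Int) : Decidable (Spec_logical_spt_py smap out) := by unfold Spec_logical_spt_py; infer_instance

-- ===== CLAIM (what is proved, stated in full; the proofs are below) =====
def Claim_equal_logical_spt_py : Prop := ∀ (smap : List (Int × Int)), Dom_logical_spt_py smap → Spec_logical_spt_py smap (logical_spt_py smap)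

-- ===== LEMMAS AND PROOFS =====

-- the mask built by pvBFold: bit i is set iff it was set initially or some in-range key equals i
theorem pvBFold_mask (l : List (Int × Int)) (mask : Nat) (mx : Option Int) (i : Nat) :
    ((pvBFold l mask mx).1).testBit i =
      (mask.testBit i || l.any (fun p => decide (1 ≤ p.1) && decide (p.1 ≤ 18) && decide (p.1.toNat = i))) := by
  induction l generalizing mask mx with
  | nil => simp [pvBFold]
  | cons p t ih =>
    simp only [pvBFold]
    rw [ih]
    by_cases h : 1 ≤ p.1 ∧ p.1 ≤ 18
    · rw [if_pos h]
      have hb : (mask ||| 1 <<< p.1.toNat).testBit i = (mask.testBit i || decide (p.1.toNat = i)) := by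
        rw [Nat.testBit_or, Nat.shiftLeft_eq, one_mul, Nat.testBit_two_pow]
        try simp [eq_comm]
      rw [hb]
      try simp [h.1, h.2, Bool.or_assoc]
    · rw [if_neg h]
      simp only [List.any_cons]
      have hfp : (decide (1 ≤ p.1) && decide (p.1 ≤ 18) && decide (p.1.toNat = i)) = false := by
        rcases not_and_or.mp h with h' | h' <;> simp [h']
      rw [hfp]
      simp

-- the running max of pvBFold is the plain foldl running max over the keys
theorem pvBFold_mx (l : List (Int × Int)) (mask : Nat) (mx : Option Int) :
    (pvBFold l mask mx).2 =
      l.foldl (fun m p => match m with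
        | none => some p.1
        | some m' => if m' < p.1 then some p.1 else some m') mx := by
  induction l generalizing mask mx with
  | nil => rfl
  | cons p t ih =>
    rw [List.foldl_cons]
    simp only [pvBFold]
    exact ih _ _

theorem pvFoldMax_some (l : List (Int × Int)) (a : Int) :
    l.foldl (fun m p => match m with
      | none => some p.1
      | some m' => if m' < p.1 then some p.1 else some m') (some a)
    = some ((l.map (fun p => p.1)).foldl max a) := by
  induction l generalizing a with
  | nil => rfl
  | cons p t ih =>
    rw [List.foldl_cons, List.map_cons, List.foldl_cons]
    have hstep : (match some a with
        | none => some p.1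
        | some m' => if m' < p.1 then some p.1 else some m') = some (max a p.1) := by
      rcases lt_or_ge a p.1 with h | h
      · simp [h, max_eq_right h.le]
      · simp [not_lt.mpr h, max_eq_left h]
    rw [hstep, ih]

-- scanning the strictly increasing list L for the run from 'run' equals counting
-- the consecutive bits of the mask above bit run, when mask and L agree above run
theorem pvScanMask (L : List Int) (mask : Nat) (run : Int)
    (hrun : 0 ≤ run)
    (hord : L.Pairwise (· < ·))
    (hgt : ∀ x ∈ L, run < x)
    (hmem : ∀ y : Int, run < y → (mask.testBit y.toNat = true ↔ y ∈ L)) :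
    pvARun L run = run + (pvTrailOnes (mask >>> (run.toNat + 1)) : Int) := by
  have hbit : ∀ k : Nat, (mask >>> k) % 2 = 1 ↔ mask.testBit k = true := by
    intro k
    simp [Nat.testBit]
  have hsucc : ∀ k : Nat, (mask >>> k) / 2 = mask >>> (k + 1) := by
    intro k; rw [Nat.shiftRight_succ]
  have htoNat : (run + 1).toNat = run.toNat + 1 := by omega
  induction L generalizing run with
  | nil =>
    have hb : ¬ mask.testBit (run + 1).toNat = true := by
      intro h
      exact absurd ((hmem (run + 1) (by omega)).mp h) (List.not_mem_nil)
    rw [htoNat] at hb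
    rw [pvARun, pvTrailOnes, dif_neg (by intro h; exact hb ((hbit _).mp h))]
    simp
  | cons s t ih =>
    have hst : ∀ x ∈ t, s < x := fun x hx => (List.pairwise_cons.mp hord).1 x hx
    by_cases hcase : s = run + 1
    · subst hcase
      have hb : mask.testBit (run.toNat + 1) = true := by
        rw [← htoNat]
        exact (hmem (run + 1) (by omega)).mpr List.mem_cons_self
      rw [pvARun, if_pos rfl]
      conv_rhs => rw [pvTrailOnes]
      rw [dif_pos ((hbit _).mpr hb), hsucc]
      have ih' := ih (run + 1) (by omega)
        (List.pairwise_cons.mp hord).2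
        (by intro x hx; exact hst x hx)
        (by
          intro y hy
          constructor
          · intro hyb
            rcases List.mem_cons.mp ((hmem y (by omega)).mp hyb) with h | h
            · omega
            · exact h
          · intro hyt
            exact (hmem y (by omega)).mpr (List.mem_cons_of_mem _ hyt))
        (by omega)
      rw [ih']
      have : (run + 1).toNat + 1 = run.toNat + 1 + 1 := by omega
      rw [this]
      push_cast
      ring
    · have hs : run < s := hgt s List.mem_cons_self
      have hb : ¬ mask.testBit (run.toNat + 1) = true := by
        rw [← htoNat]
        intro h
        rcases List.mem_cons.mp ((hmem (run + 1) (by omega)).mp h) with h' | h' 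
        · exact hcase h'.symm
        · have := hst _ h'; omega
      rw [pvARun, if_neg (by omega)]
      rw [pvTrailOnes, dif_neg (by intro h; exact hb ((hbit _).mp h))]
      simp

-- ===== VERDICT (by name: the statement is the Claim_ definition above) =====
theorem logical_spt_py_spec : Claim_equal_logical_spt_py := by
  intro smap _
  unfold Spec_logical_spt_py
  simp only [logical_spt_py, logical_spt_py_alt]
  set keys := PySem.List.dedup (smap.map (fun p => p.1)) with hkeys
  set ks := keys.filter (fun s => decide (1 ≤ s) && decide (s ≤ 18)) with hks
  set L := PySem.List.sorted ks (fun x => x) false with hL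
  set mask := (pvBFold smap 0 none).1 with hmask
  have hperm : L.Perm ks := PySem.List.sorted_perm ks _ _
  have hnd : ks.Nodup := (PySem.List.nodup_dedup _).filter _
  have hLnd : L.Nodup := hperm.nodup_iff.mpr hnd
  have hle' : L.Pairwise (fun a b => a ≤ b) := PySem.List.sorted_pairwise ks (fun x => x)
  have hord : L.Pairwise (· < ·) :=
    (hle'.and hLnd).imp (fun h => lt_of_le_of_ne h.1 h.2)
  have hrange : ∀ x ∈ L, 1 ≤ x ∧ x ≤ 18 := by
    intro x hx
    have := List.of_mem_filter (hperm.mem_iff.mp hx)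
    simp at this; exact this
  have hmem : ∀ y : Int, (0:Int) < y → (mask.testBit y.toNat = true ↔ y ∈ L) := by
    intro y hy
    rw [hmask, pvBFold_mask]
    simp only [Nat.zero_testBit, Bool.false_or, List.any_eq_true]
    constructor
    · rintro ⟨p, hp, hcond⟩
      simp only [Bool.and_eq_true, decide_eq_true_eq] at hcond
      obtain ⟨⟨h1, h2⟩, h3⟩ := hcond
      have hpy : p.1 = y := by omega
      rw [hperm.mem_iff, hks, List.mem_filter]
      refine ⟨?_, by simp; omega⟩
      rw [hkeys, PySem.List.mem_dedup]
      rw [← hpy]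
      exact List.mem_map_of_mem hp
    · intro hyL
      have hy18 := hrange y hyL
      have : y ∈ keys := List.mem_of_mem_filter (hperm.mem_iff.mp hyL)
      rw [hkeys, PySem.List.mem_dedup, List.mem_map] at this
      obtain ⟨p, hp, hpy⟩ := this
      exact ⟨p, hp, by simp [hpy]; omega⟩
  have hrun : pvARun L 0 = (pvTrailOnes (mask >>> 1) : Int) := by
    have := pvScanMask L mask 0 le_rfl hord (fun x hx => (hrange x hx).1) hmem
    simpa using this
  rw [hrun]
  by_cases hpos : (pvTrailOnes (mask >>> 1) : Int) > 0
  · have hp' : 0 < pvTrailOnes (mask >>> 1) := by exact_mod_cast hpos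
    simp [hp']
  · simp only [if_neg hpos]
    -- fallback branch: max of the keys
    cases hsm : smap with
    | nil =>
      subst hsm
      simp [pvBFold, hkeys, PySem.List.dedup, PySem.List.max?]
    | cons q t =>
      have hknil : keys ≠ [] := by
        intro h0
        have hq : q.1 ∈ keys := by
          rw [hkeys, hsm, PySem.List.mem_dedup]; simp
        rw [h0] at hq
        exact absurd hq (List.not_mem_nil)
      obtain ⟨mA, hmA⟩ : ∃ mA, PySem.List.max? keys (fun x => x) = some mA := by
        rcases h : PySem.List.max? keys (fun x => x) with _ | mA
        · exact absurd ((PySem.List.max?_eq_none_iff keys (fun x => x)).mp h) hknil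
        · exact ⟨mA, rfl⟩
      have hmAmem : mA ∈ keys := PySem.List.max?_mem hmA
      have hmAub : ∀ y ∈ keys, y ≤ mA := fun y hy => PySem.List.max?_isMax hmA y hy
      -- B's running max
      have hmx : (pvBFold smap 0 none).2 = some ((t.map (fun p => p.1)).foldl max q.1) := by
        rw [pvBFold_mx, hsm, List.foldl_cons, pvFoldMax_some]
      set mB := (t.map (fun p => p.1)).foldl max q.1 with hmB
      have hmBmem : mB ∈ smap.map (fun p => p.1) := by
        rw [hsm, List.map_cons]
        rcases PySem.List.foldl_max_mem (t.map (fun p => p.1)) q.1 with h | h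
        · rw [hmB, h]; exact List.mem_cons_self
        · exact List.mem_cons_of_mem _ h
      have hmBub : ∀ y ∈ smap.map (fun p => p.1), y ≤ mB := by
        intro y hy
        rw [hsm, List.map_cons] at hy
        rcases List.mem_cons.mp hy with h | h
        · rw [h]; exact (PySem.List.le_foldl_max (t.map (fun p => p.1)) q.1).1
        · exact (PySem.List.le_foldl_max (t.map (fun p => p.1)) q.1).2 y h
      have heq : mA = mB := by
        have h1 : mA ≤ mB := hmBub mA (by rwa [hkeys, PySem.List.mem_dedup] at hmAmem)
        have h2 : mB ≤ mA := hmAub mB (by rw [hkeys, PySem.List.mem_dedup]; exact hmBmem)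
        omega
      rw [hmA, ← hsm, hmx, heq]
      rfl
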